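-- pv_equiv track=rewrite | github.com/shuzeyfa/leetcode | E_AND_Meets_OR.py | solve_bitwise_sum
-- ===== SOURCE A (Python) =====
-- MOD = 10**9 + 7
--
-- def solve_bitwise_sum(arr):
--     n = len(arr)
--     result = 0
--
--     for j in range(n):
--         and_sum = 0
--         or_sum = 0
--
--         for i in range(n):
--             and_sum = (and_sum + (arr[i] & arr[j])) % MOD
--
--         for k in range(n):
--             or_sum = (or_sum + (arr[j] | arr[k])) % MOD
--
--         result = (result + and_sum * or_sum) % MOD
--
--     return result
-- ===== SOURCE B (Python) =====
-- MOD = 10**9 + 7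
--
-- def solve_bitwise_sum(arr):
--     W = 1 << 32
--     n = len(arr)
--     S = sum(arr)
--     neg = sum(1 for x in arr if x < 0)
--     cnt = [sum((x % W >> b) & 1 for x in arr) for b in range(32)]
--     result = 0
--     for x in arr:
--         u = x % W
--         and_raw = sum(cnt[b] << b for b in range(32) if (u >> b) & 1)
--         if x < 0:
--             and_raw -= neg * W
--         or_raw = n * x + S - and_raw
--         result = (result + (and_raw % MOD) * (or_raw % MOD)) % MOD
--     return result
-- ===== Notes on version B (the rewrite author's own statement) =====
-- stated objective: faster
-- what changed: Replaces A's O(n^2) double loop over element pairs by one pass that precomputes per-bit set-bit counts (32 counters over the 32-bit two's-complement views, with a separate negative count for the sign part), reconstructs each and_sum from the counters in O(32), and derives each or_sum arithmetically from the identity x|y = x+y-(x&y).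
import Mathlib
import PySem

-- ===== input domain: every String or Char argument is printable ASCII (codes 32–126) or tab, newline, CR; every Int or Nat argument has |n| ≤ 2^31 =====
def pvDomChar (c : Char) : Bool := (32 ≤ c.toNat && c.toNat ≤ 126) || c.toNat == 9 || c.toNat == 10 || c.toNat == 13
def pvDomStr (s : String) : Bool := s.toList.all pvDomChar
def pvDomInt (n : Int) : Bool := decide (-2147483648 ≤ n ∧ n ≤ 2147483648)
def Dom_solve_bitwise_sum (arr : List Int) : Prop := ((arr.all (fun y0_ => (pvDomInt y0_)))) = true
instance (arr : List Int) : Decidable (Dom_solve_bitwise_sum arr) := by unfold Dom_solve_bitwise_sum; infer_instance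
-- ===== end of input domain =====

-- B replaces A's quadratic pair-loops by per-bit population counts (and the identity x|y = x+y-(x&y)); measurably faster (O(n·32) vs O(n²)).

-- ===== PORT A =====
def solve_bitwise_sum (arr : List Int) : Int :=
  let MOD : Int := 1000000007
  let n : Int := arr.length
  (PySem.List.pyRange 0 n 1).foldl (fun result j =>
    let and_sum := (PySem.List.pyRange 0 n 1).foldl
      (fun and_sum i => PySem.Int.mod (and_sum + PySem.Int.band (PySem.List.pyGetD arr i 0) (PySem.List.pyGetD arr j 0)) MOD) 0
    let or_sum := (PySem.List.pyRange 0 n 1).foldl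
      (fun or_sum k => PySem.Int.mod (or_sum + PySem.Int.bor (PySem.List.pyGetD arr j 0) (PySem.List.pyGetD arr k 0)) MOD) 0
    PySem.Int.mod (result + and_sum * or_sum) MOD) 0

-- ===== PORT B =====
-- (Source B; `x >> b` / `cnt[b] << b` are Lean's `>>> / <<<` with the nonnegative range index `b` cast to Nat)
def solve_bitwise_sum_alt (arr : List Int) : Int :=
  let MOD : Int := 1000000007
  let W : Int := 4294967296
  let n : Int := arr.length
  let S : Int := arr.sum
  let neg : Int := ((arr.filter (fun x => decide (x < 0))).map (fun _ => (1:Int))).sum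
  let cnt : List Int := (PySem.List.pyRange 0 32 1).map (fun b =>
      (arr.map (fun x => PySem.Int.band (PySem.Int.mod x W >>> b.toNat) 1)).sum)
  arr.foldl (fun result x =>
    let u := PySem.Int.mod x W
    let and_raw0 :=
      ((PySem.List.pyRange 0 32 1).filter
          (fun b => PySem.Int.band (u >>> b.toNat) 1 != 0)).foldl
        (fun s b => s + (PySem.List.pyGetD cnt b 0 <<< b.toNat)) 0
    let and_raw := if x < 0 then and_raw0 - neg * W else and_raw0
    let or_raw := n * x + S - and_raw
    PySem.Int.mod (result + PySem.Int.mod and_raw MOD * PySem.Int.mod or_raw MOD) MOD) 0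

-- ===== PRECONDITION & SPEC =====
def Spec_solve_bitwise_sum (arr : List Int) (out : Int) : Prop := out = solve_bitwise_sum_alt arr
instance (arr : List Int) (out : Int) : Decidable (Spec_solve_bitwise_sum arr out) := by unfold Spec_solve_bitwise_sum; infer_instance

-- ===== CLAIM (what is proved, stated in full; the proofs are below) =====
def Claim_equal_solve_bitwise_sum : Prop := ∀ (arr : List Int), Dom_solve_bitwise_sum arr → Spec_solve_bitwise_sum arr (solve_bitwise_sum arr)


-- ===== LEMMAS AND PROOFS =====

-- Constants and bit views used only by the proofs
def pvW : Int := 4294967296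
def pvBnd (x : Int) : Prop := -2147483648 ≤ x ∧ x ≤ 2147483648
def pvUb (x : Int) : Nat := (PySem.Int.mod x pvW).toNat
def pvBit (x : Int) (b : Nat) : Int := PySem.Int.band (PySem.Int.mod x pvW >>> b) 1

-- n < 2^w is the sum of its bits
theorem pvSumrep : ∀ (w n : Nat), n < 2 ^ w →
    ((List.range w).map (fun b => 2 ^ b * (n.testBit b).toNat)).sum = n := by
  intro w
  induction w with
  | zero =>
    intro n h
    simp only [List.range_zero, List.map_nil, List.sum_nil]
    omega
  | succ w ih =>
    intro n h
    rw [List.range_succ_eq_map, List.map_cons, List.map_map, List.sum_cons]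
    have hcomp : ((List.range w).map ((fun b => 2 ^ b * (n.testBit b).toNat) ∘ Nat.succ)).sum
        = 2 * ((List.range w).map (fun b => 2 ^ b * ((n / 2).testBit b).toNat)).sum := by
      rw [← List.sum_map_mul_left]
      apply congrArg List.sum
      apply List.map_congr_left
      intro b _
      simp only [Function.comp_apply, Nat.succ_eq_add_one, Nat.testBit_add_one, pow_succ]
      ring
    rw [hcomp, ih (n / 2) (by rw [pow_succ] at h; omega)]
    rcases Nat.mod_two_eq_zero_or_one n with h0 | h0 <;>
      simp [Nat.testBit_zero, h0] <;> omega

-- bits of the w-bit complement 2^w - 1 - m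
theorem pvTbSub : ∀ (w m b : Nat), m < 2 ^ w →
    (2 ^ w - 1 - m).testBit b = (decide (b < w) && !(m.testBit b)) := by
  intro w
  induction w with
  | zero =>
    intro m b h
    have hm : m = 0 := by omega
    subst hm
    simp
  | succ w ih =>
    intro m b h
    cases b with
    | zero =>
      have hmod : (2 ^ (w + 1) - 1 - m) % 2 = 1 - m % 2 := by
        rw [pow_succ] at h ⊢; omega
      simp only [Nat.testBit_zero, hmod]
      rcases Nat.mod_two_eq_zero_or_one m with h0 | h0 <;> simp [h0]
    | succ b =>
      rw [Nat.testBit_add_one, Nat.testBit_add_one]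
      have hdiv : (2 ^ (w + 1) - 1 - m) / 2 = 2 ^ w - 1 - m / 2 := by
        rw [pow_succ] at h ⊢; omega
      rw [hdiv, ih (m / 2) b (by rw [pow_succ] at h; omega)]
      simp

theorem pvSumMapAddNat {alpha : Type} (l : List alpha) (f g : alpha → Nat) :
    (l.map (fun x => f x + g x)).sum = (l.map f).sum + (l.map g).sum := by
  induction l with
  | nil => simp
  | cons a t ih => simp only [List.map_cons, List.sum_cons, ih]; omega

-- X < 2^32 equals the bit-sum of any pointwise description of its bits
theorem pvRep (X : Nat) (hX : X < 2 ^ 32) (P : Nat → Bool)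
    (hP : ∀ b, b < 32 → X.testBit b = P b) :
    X = ((List.range 32).map (fun b => 2 ^ b * (P b).toNat)).sum := by
  conv_lhs => rw [← pvSumrep 32 X hX]
  apply congrArg List.sum
  apply List.map_congr_left
  intro b hb
  rw [hP b (List.mem_range.mp hb)]

theorem pvN1 (aN m : Nat) (ha : aN < 2 ^ 32) (hm : m < 2 ^ 32) :
    aN &&& (2 ^ 32 - 1 - m) = aN - (aN &&& m) := by
  have hc : 2 ^ 32 - 1 - m < 2 ^ 32 := by omega
  have r1 : aN &&& (2 ^ 32 - 1 - m)
      = ((List.range 32).map (fun b => 2 ^ b * ((aN.testBit b && !(m.testBit b))).toNat)).sum := by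
    apply pvRep _ (lt_of_le_of_lt Nat.and_le_left ha)
    intro b hb
    rw [Nat.testBit_and, pvTbSub 32 m b hm]
    simp [hb]
  have r2 : aN &&& m
      = ((List.range 32).map (fun b => 2 ^ b * ((aN.testBit b && m.testBit b)).toNat)).sum := by
    apply pvRep _ (lt_of_le_of_lt Nat.and_le_left ha)
    intro b hb
    rw [Nat.testBit_and]
  have key : (aN &&& (2 ^ 32 - 1 - m)) + (aN &&& m) = aN := by
    rw [r1, r2, ← pvSumMapAddNat]
    have : ((List.range 32).map (fun b =>
        2 ^ b * ((aN.testBit b && !(m.testBit b))).toNat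
          + 2 ^ b * ((aN.testBit b && m.testBit b)).toNat)).sum
        = ((List.range 32).map (fun b => 2 ^ b * (aN.testBit b).toNat)).sum := by
      apply congrArg List.sum
      apply List.map_congr_left
      intro b _
      cases ha' : aN.testBit b <;> cases hm' : m.testBit b <;> simp
    rw [this, pvSumrep 32 aN ha]
  omega

theorem pvN2 (ma mx : Nat) (ha : ma < 2 ^ 32) (hx : mx < 2 ^ 32) :
    (2 ^ 32 - 1 - ma) &&& (2 ^ 32 - 1 - mx) = 2 ^ 32 - 1 - (ma ||| mx) := by
  have hor : ma ||| mx < 2 ^ 32 := Nat.or_lt_two_pow ha hx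
  have r1 : (2 ^ 32 - 1 - ma) &&& (2 ^ 32 - 1 - mx)
      = ((List.range 32).map (fun b => 2 ^ b * ((!(ma.testBit b) && !(mx.testBit b))).toNat)).sum := by
    apply pvRep _ (lt_of_le_of_lt Nat.and_le_left (by omega))
    intro b hb
    rw [Nat.testBit_and, pvTbSub 32 ma b ha, pvTbSub 32 mx b hx]
    simp [hb]
  have r2 : 2 ^ 32 - 1 - (ma ||| mx)
      = ((List.range 32).map (fun b => 2 ^ b * ((!(ma.testBit b) && !(mx.testBit b))).toNat)).sum := by
    apply pvRep _ (by omega)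
    intro b hb
    rw [pvTbSub 32 _ b hor, Nat.testBit_or]
    cases ma.testBit b <;> cases mx.testBit b <;> simp [hb]
  rw [r1, ← r2]

theorem pvN3 (aN m : Nat) (ha : aN < 2 ^ 32) (hm : m < 2 ^ 32) :
    aN ||| (2 ^ 32 - 1 - m) = (2 ^ 32 - 1 - m) + (m &&& aN) := by
  have hc : 2 ^ 32 - 1 - m < 2 ^ 32 := by omega
  have hle : m &&& aN ≤ m := Nat.and_le_left
  have r1 : aN ||| (2 ^ 32 - 1 - m)
      = ((List.range 32).map (fun b => 2 ^ b * ((aN.testBit b || !(m.testBit b))).toNat)).sum := by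
    apply pvRep _ (Nat.or_lt_two_pow ha hc)
    intro b hb
    rw [Nat.testBit_or, pvTbSub 32 m b hm]
    simp [hb]
  have r2 : 2 ^ 32 - 1 - m
      = ((List.range 32).map (fun b => 2 ^ b * ((!(m.testBit b))).toNat)).sum := by
    apply pvRep _ hc
    intro b hb
    rw [pvTbSub 32 m b hm]
    simp [hb]
  have r3 : m &&& aN
      = ((List.range 32).map (fun b => 2 ^ b * ((m.testBit b && aN.testBit b)).toNat)).sum := by
    apply pvRep _ (lt_of_le_of_lt Nat.and_le_left hm)
    intro b hb
    rw [Nat.testBit_and]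
  rw [r1, r2, r3, ← pvSumMapAddNat]
  apply congrArg List.sum
  apply List.map_congr_left
  intro b _
  cases ha' : aN.testBit b <;> cases hm' : m.testBit b <;> simp

theorem pvN4 (ma mx : Nat) (ha : ma < 2 ^ 32) (hx : mx < 2 ^ 32) :
    (2 ^ 32 - 1 - ma) ||| (2 ^ 32 - 1 - mx) = 2 ^ 32 - 1 - (ma &&& mx) := by
  have hand : ma &&& mx < 2 ^ 32 := lt_of_le_of_lt Nat.and_le_left ha
  have r1 : (2 ^ 32 - 1 - ma) ||| (2 ^ 32 - 1 - mx)
      = ((List.range 32).map (fun b => 2 ^ b * ((!(ma.testBit b) || !(mx.testBit b))).toNat)).sum := by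
    apply pvRep _ (Nat.or_lt_two_pow (by omega) (by omega))
    intro b hb
    rw [Nat.testBit_or, pvTbSub 32 ma b ha, pvTbSub 32 mx b hx]
    simp [hb]
  have r2 : 2 ^ 32 - 1 - (ma &&& mx)
      = ((List.range 32).map (fun b => 2 ^ b * ((!(ma.testBit b) || !(mx.testBit b))).toNat)).sum := by
    apply pvRep _ (by omega)
    intro b hb
    rw [pvTbSub 32 _ b hand, Nat.testBit_and]
    cases ma.testBit b <;> cases mx.testBit b <;> simp [hb]
  rw [r1, ← r2]

theorem pvAddLandLor (m n : Nat) (hm : m < 2 ^ 32) (hn : n < 2 ^ 32) :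
    (m &&& n) + (m ||| n) = m + n := by
  have r1 : m &&& n
      = ((List.range 32).map (fun b => 2 ^ b * ((m.testBit b && n.testBit b)).toNat)).sum := by
    apply pvRep _ (lt_of_le_of_lt Nat.and_le_left hm)
    intro b _
    rw [Nat.testBit_and]
  have r2 : m ||| n
      = ((List.range 32).map (fun b => 2 ^ b * ((m.testBit b || n.testBit b)).toNat)).sum := by
    apply pvRep _ (Nat.or_lt_two_pow hm hn)
    intro b _
    rw [Nat.testBit_or]
  have r3 : ((List.range 32).map (fun b =>
      2 ^ b * ((m.testBit b && n.testBit b)).toNat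
        + 2 ^ b * ((m.testBit b || n.testBit b)).toNat)).sum
      = ((List.range 32).map (fun b =>
      2 ^ b * (m.testBit b).toNat + 2 ^ b * (n.testBit b).toNat)).sum := by
    apply congrArg List.sum
    apply List.map_congr_left
    intro b _
    cases m.testBit b <;> cases n.testBit b <;> simp
  rw [r1, r2, ← pvSumMapAddNat, r3, pvSumMapAddNat, pvSumrep 32 m hm, pvSumrep 32 n hn]

theorem pvModW_nonneg (x : Int) (h0 : 0 ≤ x) (h1 : x < pvW) : PySem.Int.mod x pvW = x := by
  rw [PySem.Int.mod_eq_emod_of_pos (by norm_num [pvW])]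
  exact Int.emod_eq_of_lt h0 h1

theorem pvModW_neg (x : Int) (h0 : x < 0) (h1 : -pvW < x) : PySem.Int.mod x pvW = x + pvW := by
  rw [PySem.Int.mod_eq_emod_of_pos (by norm_num [pvW])]
  have h2 : (0:Int) ≤ x + pvW := by simp only [pvW] at h1 ⊢; omega
  have h3 : x + pvW < pvW := by simp only [pvW] at h1 ⊢; omega
  calc x % pvW = (x + pvW * 1) % pvW := by rw [Int.add_mul_emod_self_left]
    _ = x + pvW := by rw [mul_one]; exact Int.emod_eq_of_lt h2 h3

theorem pvUb_lt (x : Int) : pvUb x < 2 ^ 32 := by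
  have h1 : 0 ≤ PySem.Int.mod x pvW := PySem.Int.mod_nonneg x (by norm_num [pvW])
  have h2 : PySem.Int.mod x pvW < pvW := PySem.Int.mod_lt x (by norm_num [pvW])
  unfold pvUb
  simp only [pvW] at h1 h2 ⊢
  omega

theorem pvUb_nonneg (x : Int) (h0 : 0 ≤ x) (h1 : x ≤ 2147483648) : pvUb x = x.toNat := by
  unfold pvUb
  rw [pvModW_nonneg x h0 (by simp only [pvW]; omega)]

theorem pvUb_neg (x : Int) (h0 : x < 0) (h1 : -2147483648 ≤ x) :
    pvUb x = 2 ^ 32 - 1 - (-x - 1).toNat := by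
  unfold pvUb
  rw [pvModW_neg x h0 (by simp only [pvW]; omega)]
  simp only [pvW]
  omega

theorem pvUb_cast (x : Int) (hb : pvBnd x) :
    ((pvUb x : Nat) : Int) = x + (if x < 0 then pvW else 0) := by
  rcases hb with ⟨hb1, hb2⟩
  by_cases hx : x < 0
  · rw [pvUb_neg x hx hb1]
    simp only [hx, if_pos, pvW]
    omega
  · rw [pvUb_nonneg x (by omega) hb2]
    simp only [hx, ite_false]
    omega

theorem pvBit_eq (x : Int) (b : Nat) : pvBit x b = (((pvUb x).testBit b).toNat : Int) := by
  have h0 : 0 ≤ PySem.Int.mod x pvW := PySem.Int.mod_nonneg x (by norm_num [pvW])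
  obtain ⟨k, hk⟩ : ∃ k : Nat, PySem.Int.mod x pvW = (k : Int) :=
    ⟨(PySem.Int.mod x pvW).toNat, (Int.toNat_of_nonneg h0).symm⟩
  have hub : pvUb x = k := by unfold pvUb; rw [hk]; simp
  unfold pvBit
  rw [hk, hub]
  rw [show ((k : Int) >>> b) = ((k >>> b : Nat) : Int) from rfl,
      show (1 : Int) = ((1 : Nat) : Int) from rfl,
      PySem.Int.band_natCast]
  have hbit : (k >>> b) &&& 1 = (k.testBit b).toNat := by
    rw [Nat.and_one_is_mod]
    rcases Nat.mod_two_eq_zero_or_one (k >>> b) with h | h <;>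
      simp [Nat.testBit, h]
  exact_mod_cast congrArg (fun t : Nat => (t : Int)) hbit

theorem pvK2 (a x : Int) (hba : pvBnd a) (hbx : pvBnd x) :
    PySem.Int.band a x = ((pvUb a &&& pvUb x : Nat) : Int) - (if a < 0 ∧ x < 0 then pvW else 0) := by
  have hpow : (2:Nat) ^ 32 = 4294967296 := by norm_num
  rcases hba with ⟨hba1, hba2⟩
  rcases hbx with ⟨hbx1, hbx2⟩
  by_cases ha : 0 ≤ a <;> by_cases hx : 0 ≤ x
  · simp only [PySem.Int.band, if_pos ha, if_pos hx]
    rw [pvUb_nonneg a ha hba2, pvUb_nonneg x hx hbx2]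
    simp [show ¬(a < 0 ∧ x < 0) by omega]
  · simp only [PySem.Int.band, if_pos ha, if_neg hx]
    rw [pvUb_nonneg a ha hba2, pvUb_neg x (by omega) hbx1]
    rw [pvN1 a.toNat ((-x - 1).toNat) (by omega) (by omega)]
    simp [show ¬(a < 0 ∧ x < 0) by omega]
  · simp only [PySem.Int.band, if_neg ha, if_pos hx]
    rw [pvUb_neg a (by omega) hba1, pvUb_nonneg x hx hbx2]
    rw [Nat.land_comm (2 ^ 32 - 1 - (-a - 1).toNat) x.toNat,
      pvN1 x.toNat ((-a - 1).toNat) (by omega) (by omega)]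
    simp [show ¬(a < 0 ∧ x < 0) by omega]
  · simp only [PySem.Int.band, if_neg ha, if_neg hx]
    rw [pvUb_neg a (by omega) hba1, pvUb_neg x (by omega) hbx1]
    rw [pvN2 ((-a - 1).toNat) ((-x - 1).toNat) (by omega) (by omega)]
    have hor : (-a - 1).toNat ||| (-x - 1).toNat < 2 ^ 32 :=
      Nat.or_lt_two_pow (by omega) (by omega)
    rw [if_pos (show a < 0 ∧ x < 0 from ⟨by omega, by omega⟩)]
    simp only [pvW]
    rw [hpow] at hor ⊢
    generalize he : (-a - 1).toNat ||| (-x - 1).toNat = e at hor ⊢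
    omega

theorem pvK2or (a x : Int) (hba : pvBnd a) (hbx : pvBnd x) :
    PySem.Int.bor a x = ((pvUb a ||| pvUb x : Nat) : Int) - (if a < 0 ∨ x < 0 then pvW else 0) := by
  have hpow : (2:Nat) ^ 32 = 4294967296 := by norm_num
  rcases hba with ⟨hba1, hba2⟩
  rcases hbx with ⟨hbx1, hbx2⟩
  by_cases ha : 0 ≤ a <;> by_cases hx : 0 ≤ x
  · simp only [PySem.Int.bor, if_pos ha, if_pos hx]
    rw [pvUb_nonneg a ha hba2, pvUb_nonneg x hx hbx2]
    simp [show ¬(a < 0 ∨ x < 0) by omega]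
  · simp only [PySem.Int.bor, if_pos ha, if_neg hx]
    rw [pvUb_nonneg a ha hba2, pvUb_neg x (by omega) hbx1]
    rw [pvN3 a.toNat ((-x - 1).toNat) (by omega) (by omega)]
    have hle : (-x - 1).toNat &&& a.toNat ≤ (-x - 1).toNat := Nat.and_le_left
    simp only [show (a < 0 ∨ x < 0) from Or.inr (by omega), if_pos, pvW]
    omega
  · simp only [PySem.Int.bor, if_neg ha, if_pos hx]
    rw [pvUb_neg a (by omega) hba1, pvUb_nonneg x hx hbx2]
    rw [Nat.lor_comm ((2:Nat) ^ 32 - 1 - (-a - 1).toNat) x.toNat,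
      pvN3 x.toNat ((-a - 1).toNat) (by omega) (by omega)]
    have hle : (-a - 1).toNat &&& x.toNat ≤ (-a - 1).toNat := Nat.and_le_left
    simp only [show (a < 0 ∨ x < 0) from Or.inl (by omega), if_pos, pvW]
    omega
  · simp only [PySem.Int.bor, if_neg ha, if_neg hx]
    rw [pvUb_neg a (by omega) hba1, pvUb_neg x (by omega) hbx1]
    rw [pvN4 ((-a - 1).toNat) ((-x - 1).toNat) (by omega) (by omega)]
    have hand : (-a - 1).toNat &&& (-x - 1).toNat < 2 ^ 32 :=
      lt_of_le_of_lt Nat.and_le_left (by omega)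
    simp only [show (a < 0 ∨ x < 0) from Or.inl (by omega), if_pos, pvW]
    omega

theorem pvOrId (a x : Int) (hba : pvBnd a) (hbx : pvBnd x) :
    PySem.Int.bor a x = a + x - PySem.Int.band a x := by
  have h1 := pvK2 a x hba hbx
  have h2 := pvK2or a x hba hbx
  have h3 := pvAddLandLor (pvUb a) (pvUb x) (pvUb_lt a) (pvUb_lt x)
  have h3' : ((pvUb a &&& pvUb x : Nat) : Int) + ((pvUb a ||| pvUb x : Nat) : Int)
      = ((pvUb a : Nat) : Int) + ((pvUb x : Nat) : Int) := by exact_mod_cast h3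
  have h4 := pvUb_cast a hba
  have h5 := pvUb_cast x hbx
  by_cases ha : a < 0 <;> by_cases hx : x < 0 <;>
    simp only [ha, hx, and_true, and_false, or_true, or_false,
      if_true, if_false] at h1 h2 h4 h5 <;>
    omega

theorem pvK (a x : Int) (hba : pvBnd a) (hbx : pvBnd x) :
    PySem.Int.band a x
      = ((List.range 32).map (fun b => if pvBit x b ≠ 0 then pvBit a b <<< b else 0)).sum
        - (if a < 0 ∧ x < 0 then pvW else 0) := by
  rw [pvK2 a x hba hbx]
  have hlt : pvUb a &&& pvUb x < 2 ^ 32 := lt_of_le_of_lt Nat.and_le_left (pvUb_lt a)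
  have e : ((pvUb a &&& pvUb x : Nat) : Int)
      = ((List.range 32).map (fun b => if pvBit x b ≠ 0 then pvBit a b <<< b else 0)).sum := by
    conv_lhs => rw [← pvSumrep 32 _ hlt]
    rw [Nat.cast_list_sum, List.map_map]
    apply congrArg List.sum
    apply List.map_congr_left
    intro b _
    simp only [Function.comp_apply]
    rw [pvBit_eq, pvBit_eq, Nat.testBit_and]
    cases hta : (pvUb a).testBit b <;> cases htx : (pvUb x).testBit b <;>
      simp [Int.shiftLeft_eq]
  rw [e]

theorem pvSUM : ∀ (arr : List Int) (x : Int), (∀ a ∈ arr, pvBnd a) → pvBnd x →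
    (arr.map (fun a => PySem.Int.band a x)).sum
      = ((List.range 32).map
          (fun b => if pvBit x b ≠ 0 then ((arr.map (fun a => pvBit a b)).sum) <<< b else 0)).sum
        - (if x < 0 then ((arr.map (fun a => if a < 0 then (1:Int) else 0)).sum) * pvW else 0) := by
  intro arr x
  induction arr with
  | nil =>
    intro _ _
    simp [Int.shiftLeft_eq]
  | cons a t ih =>
    intro hmem hbx
    have hba : pvBnd a := hmem a (by simp)
    have hmt : ∀ y ∈ t, pvBnd y := fun y hy => hmem y (List.mem_cons_of_mem a hy)
    simp only [List.map_cons, List.sum_cons]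
    rw [ih hmt hbx, pvK a x hba hbx]
    have hsplit : ((List.range 32).map (fun b =>
        if pvBit x b ≠ 0 then (pvBit a b + (t.map (fun a => pvBit a b)).sum) <<< b else 0)).sum
      = ((List.range 32).map (fun b => if pvBit x b ≠ 0 then pvBit a b <<< b else 0)).sum
        + ((List.range 32).map (fun b =>
            if pvBit x b ≠ 0 then ((t.map (fun a => pvBit a b)).sum) <<< b else 0)).sum := by
      rw [← PySem.List.sum_map_add_int]
      apply congrArg List.sum
      apply List.map_congr_left
      intro b _
      split <;> simp [Int.shiftLeft_eq, add_mul]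
    rw [hsplit]
    by_cases hx : x < 0 <;> by_cases ha : a < 0 <;> simp [hx, ha] <;> ring

theorem pvORSUM : ∀ (arr : List Int) (x : Int), (∀ a ∈ arr, pvBnd a) → pvBnd x →
    (arr.map (fun a => PySem.Int.bor x a)).sum
      = (arr.length : Int) * x + arr.sum - (arr.map (fun a => PySem.Int.band a x)).sum := by
  intro arr x
  induction arr with
  | nil => intro _ _; simp
  | cons a t ih =>
    intro hmem hbx
    have hba : pvBnd a := hmem a (by simp)
    have hmt : ∀ y ∈ t, pvBnd y := fun y hy => hmem y (List.mem_cons_of_mem a hy)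
    simp only [List.map_cons, List.sum_cons, List.length_cons]
    rw [ih hmt hbx, pvOrId x a hbx hba, PySem.Int.band_comm x a]
    push_cast
    ring

theorem pvFM : ∀ (l : List Int) (f : Int → Int) (z : Int),
    l.foldl (fun acc t => PySem.Int.mod (acc + f t) 1000000007) (z % 1000000007)
      = (z + (l.map f).sum) % 1000000007 := by
  intro l
  induction l with
  | nil => intro f z; simp
  | cons a t ih =>
    intro f z
    simp only [List.foldl_cons, List.map_cons, List.sum_cons]
    have h0 : PySem.Int.mod (z % 1000000007 + f a) 1000000007
        = (z + f a) % 1000000007 := by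
      rw [PySem.Int.mod_eq_emod_of_pos (by norm_num)]
      omega
    rw [h0, ih f (z + f a)]
    have h2 : z + f a + (t.map f).sum = z + (f a + (t.map f).sum) := by ring
    rw [h2]

theorem pvFM0 (l : List Int) (f : Int → Int) :
    l.foldl (fun acc t => PySem.Int.mod (acc + f t) 1000000007) 0
      = (l.map f).sum % 1000000007 := by
  have h := pvFM l f 0
  simpa using h

theorem pvSumFilter {alpha : Type} (l : List alpha) (q : alpha → Bool) (g : alpha → Int) :
    ((l.filter q).map g).sum = (l.map (fun b => if q b then g b else 0)).sum := by
  induction l with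
  | nil => simp
  | cons a t ih =>
    by_cases h : q a = true <;> simp [h, ih]

theorem pvNegEq (arr : List Int) :
    ((arr.filter (fun x => decide (x < 0))).map (fun _ => (1:Int))).sum
      = (arr.map (fun a => if a < 0 then (1:Int) else 0)).sum := by
  induction arr with
  | nil => simp
  | cons a t ih =>
    by_cases h : a < 0
    · have hf : List.filter (fun x => decide (x < 0)) (a :: t)
          = a :: List.filter (fun x => decide (x < 0)) t := by simp [h]
      rw [hf, List.map_cons, List.sum_cons, ih]
      simp [h]
    · have hf : List.filter (fun x => decide (x < 0)) (a :: t)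
          = List.filter (fun x => decide (x < 0)) t := by simp [h]
      rw [hf, ih]
      simp [h]

theorem pvBside (arr : List Int) (x : Int) :
    ((PySem.List.pyRange 0 32 1).filter
        (fun b => PySem.Int.band (PySem.Int.mod x 4294967296 >>> b.toNat) 1 != 0)).foldl
      (fun s b => s + (PySem.List.pyGetD
          ((PySem.List.pyRange 0 32 1).map (fun b =>
            (arr.map (fun x => PySem.Int.band (PySem.Int.mod x 4294967296 >>> b.toNat) 1)).sum)) b 0
        <<< b.toNat)) 0
    = ((List.range 32).map
        (fun b => if pvBit x b ≠ 0 then ((arr.map (fun a => pvBit a b)).sum) <<< b else 0)).sum := by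
  rw [PySem.List.foldl_add, pvSumFilter, zero_add]
  have leg1 : ((PySem.List.pyRange 0 32 1).map (fun b =>
      if (PySem.Int.band (PySem.Int.mod x 4294967296 >>> b.toNat) 1 != 0) = true
      then PySem.List.pyGetD
          ((PySem.List.pyRange 0 32 1).map (fun b =>
            (arr.map (fun x => PySem.Int.band (PySem.Int.mod x 4294967296 >>> b.toNat) 1)).sum)) b 0
          <<< b.toNat
      else 0)).sum
    = ((PySem.List.pyRange 0 32 1).map (fun j =>
        if pvBit x j.toNat ≠ 0 then ((arr.map (fun a => pvBit a j.toNat)).sum) <<< j.toNat else 0)).sum := by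
    apply congrArg List.sum
    apply List.map_congr_left
    intro j hj
    rw [PySem.List.mem_pyRange_one] at hj
    rw [PySem.List.pyGetD_map_pyRange_of_nonneg _ 32 j 0 hj.1 hj.2]
    simp only [pvBit, pvW, ← Int.shiftRight_natCast_right, ← Int.shiftLeft_natCast_right]
    simp [bne_iff_ne, Int.toNat_of_nonneg hj.1]
  rw [leg1, PySem.List.pyRange_one 0 32]
  simp only [show ((32:Int) - 0).toNat = 32 from by decide, List.map_map]
  apply congrArg List.sum
  apply List.map_congr_left
  intro b _
  simp [pvBit, pvW, Int.shiftLeft_natCast_right]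

-- ===== VERDICT (by name: the statement is the Claim_ definition above) =====
theorem solve_bitwise_sum_spec : Claim_equal_solve_bitwise_sum := by
  intro arr hdom
  unfold Spec_solve_bitwise_sum
  have hb : ∀ a ∈ arr, pvBnd a := by
    unfold Dom_solve_bitwise_sum at hdom
    simp only [List.all_eq_true, pvDomInt, decide_eq_true_eq] at hdom
    exact fun a ha => hdom a ha
  simp only [solve_bitwise_sum, solve_bitwise_sum_alt]
  rw [PySem.List.foldl_pyRange_zero_pyGetD' arr 0 (fun result xj =>
    PySem.Int.mod (result
      + ((PySem.List.pyRange 0 (arr.length : Int) 1).foldl (fun and_sum i =>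
          PySem.Int.mod (and_sum + PySem.Int.band (PySem.List.pyGetD arr i 0) xj) 1000000007) 0)
      * ((PySem.List.pyRange 0 (arr.length : Int) 1).foldl (fun or_sum k =>
          PySem.Int.mod (or_sum + PySem.Int.bor xj (PySem.List.pyGetD arr k 0)) 1000000007) 0)) 1000000007) 0]
  refine PySem.List.foldl_congr_mem arr _ _ 0 ?_
  intro acc x hx
  rw [PySem.List.foldl_pyRange_zero_pyGetD' arr 0 (fun and_sum a =>
        PySem.Int.mod (and_sum + PySem.Int.band a x) 1000000007) 0,
      PySem.List.foldl_pyRange_zero_pyGetD' arr 0 (fun or_sum a =>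
        PySem.Int.mod (or_sum + PySem.Int.bor x a) 1000000007) 0,
      pvFM0 arr (fun a => PySem.Int.band a x), pvFM0 arr (fun a => PySem.Int.bor x a)]
  have hbx : pvBnd x := hb x hx
  rw [pvBside arr x, pvNegEq arr]
  have hAR : (if x < 0
      then ((List.range 32).map (fun b =>
          if pvBit x b ≠ 0 then ((arr.map (fun a => pvBit a b)).sum) <<< b else 0)).sum
        - ((arr.map (fun a => if a < 0 then (1:Int) else 0)).sum) * 4294967296
      else ((List.range 32).map (fun b =>
          if pvBit x b ≠ 0 then ((arr.map (fun a => pvBit a b)).sum) <<< b else 0)).sum)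
      = (arr.map (fun a => PySem.Int.band a x)).sum := by
    rw [pvSUM arr x hb hbx]
    by_cases hneg : x < 0 <;> simp [hneg, pvW]
  rw [hAR, ← pvORSUM arr x hb hbx]
  congr 1
  congr 1
  rw [PySem.Int.mod_eq_emod_of_pos (by norm_num : (0:Int) < 1000000007),
      PySem.Int.mod_eq_emod_of_pos (by norm_num : (0:Int) < 1000000007)]
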